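-- pv_equiv track=rewrite | github.com/zeeoale/PromptCreatorNode | nodes/director.py | _score_take
-- ===== SOURCE A (Python) =====
-- from typing import Dict, Optional, List, Tuple, Any
--
-- def _score_take(
--
--     rule: str,
--     keyword: str,
--     chosen: Dict[str, str],
--     final_prompt: str,
-- ) -> int:
--     rule = (rule or "balanced").lower().strip()
--     kw = (keyword or "").lower().strip()
--
--     cam = (chosen.get("camera") or "").lower()
--     light = (chosen.get("lighting") or "").lower()
--
--     def has_any(text: str, needles: List[str]) -> bool:
--         return any(n in text for n in needles)
--
--     score = 0
--
--     if rule == "closeup":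
--         if has_any(cam, ["close", "85mm", "105mm", "portrait", "tight"]):
--             score += 10
--         if "24mm" in cam:
--             score -= 2
--
--     elif rule == "lowlight":
--         if has_any(light, ["low", "dim", "candle", "noir", "shadow", "dark"]):
--             score += 10
--         if has_any(light, ["bright", "daylight", "high key"]):
--             score -= 3
--
--     elif rule == "profile":
--         if "profile" in cam:
--             score += 10
--         if has_any(cam, ["frontal", "centered frontal"]):
--             score -= 1
--
--     elif rule == "keyword":
--         if kw:
--             score += final_prompt.lower().count(kw) * 10
--
--     else:  # balanced
--         if has_any(cam, ["close", "portrait", "85mm", "105mm"]):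
--             score += 5
--         if has_any(light, ["low", "shadow", "noir", "candle", "dim"]):
--             score += 5
--
--     return score
-- ===== SOURCE B (Python) =====
-- TABLE = {
--     "closeup": [
--         ("cam", ["close", "85mm", "105mm", "portrait", "tight"], 10),
--         ("cam", ["24mm"], -2),
--     ],
--     "lowlight": [
--         ("light", ["low", "dim", "candle", "noir", "shadow", "dark"], 10),
--         ("light", ["bright", "daylight", "high key"], -3),
--     ],
--     "profile": [
--         ("cam", ["profile"], 10),
--         ("cam", ["frontal", "centered frontal"], -1),
--     ],
-- }
-- BALANCED = [
--     ("cam", ["close", "portrait", "85mm", "105mm"], 5),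
--     ("light", ["low", "shadow", "noir", "candle", "dim"], 5),
-- ]
--
--
-- def _score_take(rule, keyword, chosen, final_prompt):
--     rule = (rule or "balanced").lower().strip()
--     kw = (keyword or "").lower().strip()
--     cam = (chosen.get("camera") or "").lower()
--     light = (chosen.get("lighting") or "").lower()
--
--     if rule == "keyword":
--         return final_prompt.lower().count(kw) * 10 if kw else 0
--
--     fields = {"cam": cam, "light": light}
--     return sum(
--         pts
--         for field, needles, pts in TABLE.get(rule, BALANCED)
--         if any(n in fields[field] for n in needles)
--     )
-- ===== Notes on version B (the rewrite author's own statement) =====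
-- stated objective: idiomatic
-- what changed: Replaces the per-rule if/elif chain of hand-written scoring branches with a static data table mapping each rule to (field, needles, points) conditions, scored by one generic sum over the looked-up condition list (balanced as the default), with only the keyword rule kept as a dedicated count branch.
import Mathlib
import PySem

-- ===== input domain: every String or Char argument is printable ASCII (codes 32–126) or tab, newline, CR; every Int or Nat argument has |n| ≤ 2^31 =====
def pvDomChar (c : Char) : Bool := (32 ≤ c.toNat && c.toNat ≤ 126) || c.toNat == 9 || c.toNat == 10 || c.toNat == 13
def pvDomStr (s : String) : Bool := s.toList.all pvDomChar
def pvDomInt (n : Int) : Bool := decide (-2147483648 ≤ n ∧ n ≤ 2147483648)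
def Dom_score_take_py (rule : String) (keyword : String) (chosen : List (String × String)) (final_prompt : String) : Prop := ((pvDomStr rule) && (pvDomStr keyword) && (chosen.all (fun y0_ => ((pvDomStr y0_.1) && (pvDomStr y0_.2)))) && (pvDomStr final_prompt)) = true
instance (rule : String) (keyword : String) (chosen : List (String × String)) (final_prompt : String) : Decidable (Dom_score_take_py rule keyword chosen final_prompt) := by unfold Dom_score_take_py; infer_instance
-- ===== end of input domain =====

-- B replaces A's per-rule if/elif chain by a static rule -> [(field, needles, points)] table
-- scored with one generic sum (objective: idiomatic); return values are proved identical.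

-- ===== PORT A =====
def pvHasAny (text : String) (needles : List String) : Bool :=
  needles.any (fun n => PySem.Str.isIn n text)

def score_take_py (rule : String) (keyword : String) (chosen : List (String × String)) (final_prompt : String) : Int :=
  let r := PySem.Str.strip (PySem.Str.lower (if rule = "" then "balanced" else rule))
  let kw := PySem.Str.strip (PySem.Str.lower (if keyword = "" then "" else keyword))
  let cam := PySem.Str.lower (((PySem.Dict.ofList chosen).get? "camera").getD "")
  let light := PySem.Str.lower (((PySem.Dict.ofList chosen).get? "lighting").getD "")
  let score : Int := 0
  if r = "closeup" then
    let score := if pvHasAny cam ["close", "85mm", "105mm", "portrait", "tight"] then score + 10 else score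
    let score := if PySem.Str.isIn "24mm" cam then score - 2 else score
    score
  else if r = "lowlight" then
    let score := if pvHasAny light ["low", "dim", "candle", "noir", "shadow", "dark"] then score + 10 else score
    let score := if pvHasAny light ["bright", "daylight", "high key"] then score - 3 else score
    score
  else if r = "profile" then
    let score := if PySem.Str.isIn "profile" cam then score + 10 else score
    let score := if pvHasAny cam ["frontal", "centered frontal"] then score - 1 else score
    score
  else if r = "keyword" then
    if kw ≠ "" then score + (PySem.Str.count (PySem.Str.lower final_prompt) kw : Int) * 10 else score
  else
    let score := if pvHasAny cam ["close", "portrait", "85mm", "105mm"] then score + 5 else score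
    let score := if pvHasAny light ["low", "shadow", "noir", "candle", "dim"] then score + 5 else score
    score

-- ===== PORT B =====
def pvTable : List (String × List (String × List String × Int)) :=
  [("closeup",
     [("cam", (["close", "85mm", "105mm", "portrait", "tight"], 10)),
      ("cam", (["24mm"], -2))]),
   ("lowlight",
     [("light", (["low", "dim", "candle", "noir", "shadow", "dark"], 10)),
      ("light", (["bright", "daylight", "high key"], -3))]),
   ("profile",
     [("cam", (["profile"], 10)),
      ("cam", (["frontal", "centered frontal"], -1))])]

def pvBalanced : List (String × List String × Int) :=
  [("cam", (["close", "portrait", "85mm", "105mm"], 5)),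
   ("light", (["low", "shadow", "noir", "candle", "dim"], 5))]

def score_take_py_alt (rule : String) (keyword : String) (chosen : List (String × String)) (final_prompt : String) : Int :=
  let r := PySem.Str.strip (PySem.Str.lower (if rule = "" then "balanced" else rule))
  let kw := PySem.Str.strip (PySem.Str.lower (if keyword = "" then "" else keyword))
  let cam := PySem.Str.lower (((PySem.Dict.ofList chosen).get? "camera").getD "")
  let light := PySem.Str.lower (((PySem.Dict.ofList chosen).get? "lighting").getD "")
  if r = "keyword" then
    if kw ≠ "" then (PySem.Str.count (PySem.Str.lower final_prompt) kw : Int) * 10 else 0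
  else
    let fields : PySem.Dict String String := PySem.Dict.ofList [("cam", cam), ("light", light)]
    let conds := ((PySem.Dict.ofList pvTable).get? r).getD pvBalanced
    ((conds.filter
        (fun c => c.2.1.any (fun n => PySem.Str.isIn n ((fields.get? c.1).getD "")))).map
      (fun c => c.2.2)).sum

-- ===== PRECONDITION & SPEC =====
def Spec_score_take_py (rule : String) (keyword : String) (chosen : List (String × String)) (final_prompt : String) (out : Int) : Prop := out = score_take_py_alt rule keyword chosen final_prompt
instance (rule : String) (keyword : String) (chosen : List (String × String)) (final_prompt : String) (out : Int) : Decidable (Spec_score_take_py rule keyword chosen final_prompt out) := by unfold Spec_score_take_py; infer_instance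

-- ===== CLAIM (what is proved, stated in full; the proofs are below) =====
def Claim_equal_score_take_py : Prop := ∀ (rule : String) (keyword : String) (chosen : List (String × String)) (final_prompt : String), Dom_score_take_py rule keyword chosen final_prompt → Spec_score_take_py rule keyword chosen final_prompt (score_take_py rule keyword chosen final_prompt)

-- ===== LEMMAS AND PROOFS =====

lemma pv_sum_two {α : Type} (p : α → Bool) (c1 c2 : α) (f : α → Int) :
    (([c1, c2].filter p).map f).sum = (if p c1 then f c1 else 0) + (if p c2 then f c2 else 0) := by
  by_cases h1 : p c1 <;> by_cases h2 : p c2 <;> simp [h1, h2]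

lemma pv_get_none (r : String) (h1 : ¬ r = "closeup") (h2 : ¬ r = "lowlight") (h3 : ¬ r = "profile") :
    (PySem.Dict.ofList pvTable).get? r = none := by
  have e1 : ("closeup" == r) = false := beq_eq_false_iff_ne.mpr (Ne.symm h1)
  have e2 : ("lowlight" == r) = false := beq_eq_false_iff_ne.mpr (Ne.symm h2)
  have e3 : ("profile" == r) = false := beq_eq_false_iff_ne.mpr (Ne.symm h3)
  simp [PySem.Dict.get?, PySem.Dict.ofList, PySem.Dict.update, PySem.Dict.empty,
    PySem.Dict.insert, pvTable, List.find?, e1, e2, e3]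

-- ===== VERDICT (by name: the statement is the Claim_ definition above) =====
theorem score_take_py_spec : Claim_equal_score_take_py := by
  intro rule keyword chosen final_prompt _
  show score_take_py rule keyword chosen final_prompt = score_take_py_alt rule keyword chosen final_prompt
  unfold score_take_py score_take_py_alt
  dsimp only []
  generalize (PySem.Str.strip (PySem.Str.lower (if rule = "" then "balanced" else rule))) = r
  generalize (PySem.Str.strip (PySem.Str.lower (if keyword = "" then "" else keyword))) = kw
  generalize PySem.Str.lower (((PySem.Dict.ofList chosen).get? "camera").getD "") = cam
  generalize PySem.Str.lower (((PySem.Dict.ofList chosen).get? "lighting").getD "") = light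
  have hc : (((PySem.Dict.ofList [("cam", cam), ("light", light)]).get? "cam").getD "") = cam := rfl
  have hl : (((PySem.Dict.ofList [("cam", cam), ("light", light)]).get? "light").getD "") = light := rfl
  by_cases h1 : r = "closeup"
  · subst h1
    rw [show ((PySem.Dict.ofList pvTable).get? "closeup") = some
      [("cam", (["close", "85mm", "105mm", "portrait", "tight"], 10)), ("cam", (["24mm"], -2))] from rfl]
    simp [pvHasAny, pv_sum_two, hc]
    split_ifs <;> omega
  by_cases h2 : r = "lowlight"
  · subst h2
    rw [show ((PySem.Dict.ofList pvTable).get? "lowlight") = some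
      [("light", (["low", "dim", "candle", "noir", "shadow", "dark"], 10)),
       ("light", (["bright", "daylight", "high key"], -3))] from rfl]
    simp [pvHasAny, pv_sum_two, hl]
    split_ifs <;> omega
  by_cases h3 : r = "profile"
  · subst h3
    rw [show ((PySem.Dict.ofList pvTable).get? "profile") = some
      [("cam", (["profile"], 10)), ("cam", (["frontal", "centered frontal"], -1))] from rfl]
    simp [pvHasAny, pv_sum_two, hc]
    split_ifs <;> omega
  by_cases h4 : r = "keyword"
  · subst h4
    simp only [if_neg h1, if_neg h2, if_neg h3]
    split_ifs <;> omega
  · rw [pv_get_none r h1 h2 h3]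
    simp only [if_neg h1, if_neg h2, if_neg h3, if_neg h4, Option.getD_none]
    show _ = (((pvBalanced.filter _).map _).sum)
    simp [pvHasAny, pvBalanced, pv_sum_two, hc, hl]
    split_ifs <;> omega
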